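-- pv_equiv track=rewrite | github.com/osmond-jian/riot_esports_ranking | DataPrep/DataPrep.py | compute_win_streak
-- ===== SOURCE A (Python) =====
-- def compute_win_streak(series):
--     streak = 0
--     streak_list = []
--     for s in series:
--         if s == "win":
--             streak += 1
--         else:
--             streak = 0
--         streak_list.append(streak)
--     return streak_list
-- ===== SOURCE B (Python) =====
-- def compute_win_streak(series):
--     out = []
--     i = 0
--     n = len(series)
--     while i < n:
--         j = i
--         while j < n and series[j] == series[i]:
--             j += 1
--         run_len = j - i
--         if series[i] == "win":
--             out.extend(range(1, run_len + 1))
--         else: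
--             out.extend([0] * run_len)
--         i = j
--     return out
-- ===== Notes on version B (the rewrite author's own statement) =====
-- stated objective: alternative
-- what changed: Replaces the scalar running-accumulator pass with a run-splitting strategy: the list is cut into maximal runs of equal values, each win-run contributes 1..L and any other run L zeros.
import Mathlib
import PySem

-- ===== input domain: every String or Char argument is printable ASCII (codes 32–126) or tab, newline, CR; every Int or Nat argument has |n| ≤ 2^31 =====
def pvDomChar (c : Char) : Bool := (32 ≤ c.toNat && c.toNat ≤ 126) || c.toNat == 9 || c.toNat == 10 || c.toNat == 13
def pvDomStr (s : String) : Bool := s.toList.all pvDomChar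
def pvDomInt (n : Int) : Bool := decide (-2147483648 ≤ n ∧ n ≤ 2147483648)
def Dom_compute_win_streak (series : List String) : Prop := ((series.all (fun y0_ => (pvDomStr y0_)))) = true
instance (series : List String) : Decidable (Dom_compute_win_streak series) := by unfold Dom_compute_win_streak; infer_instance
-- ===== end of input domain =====

-- B replaces A's scalar running-accumulator pass by splitting the list into maximal
-- runs of equal values and emitting 1..L per win-run, L zeros otherwise (alternative decomposition).


-- ===== PORT A =====
-- literal transliteration: one pass with state (streak, streak_list)
def compute_win_streak (series : List String) : List Int :=
  (series.foldl (fun (st : Int × List Int) s =>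
    let streak := if s == "win" then st.1 + 1 else (0 : Int)
    (streak, st.2 ++ [streak])) (0, [])).2

-- ===== PORT B =====
-- literal transliteration of B: split off the maximal run at the head, emit its block, recurse
def compute_win_streak_alt (series : List String) : List Int :=
  match series with
  | [] => []
  | s :: rest =>
    let run := rest.takeWhile (· == s)
    let runLen := run.length + 1
    (if s == "win" then (List.range runLen).map (fun (i : Nat) => (i : Int) + 1)
     else List.replicate runLen (0 : Int))
      ++ compute_win_streak_alt (rest.dropWhile (· == s))
termination_by series.length
decreasing_by
  simp only [List.length_cons]
  exact Nat.lt_succ_of_le (List.length_dropWhile_le _ _)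

-- ===== PRECONDITION & SPEC =====
def Spec_compute_win_streak (series : List String) (out : List Int) : Prop := out = compute_win_streak_alt series
instance (series : List String) (out : List Int) : Decidable (Spec_compute_win_streak series out) := by unfold Spec_compute_win_streak; infer_instance

-- ===== CLAIM (what is proved, stated in full; the proofs are below) =====
def Claim_equal_compute_win_streak : Prop := ∀ (series : List String), Dom_compute_win_streak series → Spec_compute_win_streak series (compute_win_streak series)

-- ===== LEMMAS AND PROOFS =====

-- simple recursive characterisation of A's loop
def csGo (streak : Int) : List String → List Int
  | [] => []
  | s :: r =>
    let k := if s == "win" then streak + 1 else 0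
    k :: csGo k r

theorem csGo_foldl (l : List String) : ∀ (streak : Int) (acc : List Int),
    (l.foldl (fun (st : Int × List Int) s =>
      let streak := if s == "win" then st.1 + 1 else (0 : Int)
      (streak, st.2 ++ [streak])) (streak, acc)).2 = acc ++ csGo streak l := by
  induction l with
  | nil => intro streak acc; simp [csGo]
  | cons s r ih =>
    intro streak acc
    simp only [List.foldl_cons, csGo]
    rw [ih]
    simp

theorem csGo_zeros (run : List String) (suf : List String)
    (h : ∀ x ∈ run, x ≠ "win") :
    csGo 0 (run ++ suf) = List.replicate run.length 0 ++ csGo 0 suf := by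
  induction run with
  | nil => simp
  | cons a r ih =>
    have ha : (a == "win") = false := by
      simpa using h a (List.mem_cons_self)
    simp only [List.cons_append, csGo, ha, List.length_cons, List.replicate_succ,
      Bool.false_eq_true, if_false]
    exact congrArg _ (ih (fun x hx => h x (List.mem_cons_of_mem _ hx)))

theorem range_map_shift (c : Int) : ∀ (n : Nat),
    (c + 1) :: (List.range n).map (fun (i : Nat) => c + 1 + (i : Int) + 1)
      = (List.range (n + 1)).map (fun (i : Nat) => c + (i : Int) + 1)
  | 0 => by simp
  | n + 1 => by
    rw [List.range_succ (n := n + 1), List.map_append, ← range_map_shift c n, List.cons_append]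
    congr 1
    rw [List.range_succ (n := n), List.map_append]
    congr 1
    have h1 : c + 1 + (n : Int) + 1 = c + ((n + 1 : Nat) : Int) + 1 := by push_cast; ring
    simp [h1]

theorem csGo_wins (run : List String) (suf : List String)
    (h : ∀ x ∈ run, x = "win") : ∀ (c : Int),
    csGo c (run ++ suf) =
      (List.range run.length).map (fun (i : Nat) => c + (i : Int) + 1) ++ csGo (c + run.length) suf := by
  induction run with
  | nil => intro c; simp
  | cons a r ih =>
    intro c
    have ha : (a == "win") = true := by
      simpa using h a (List.mem_cons_self)
    simp only [List.cons_append, csGo, ha, if_true, List.length_cons]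
    rw [ih (fun x hx => h x (List.mem_cons_of_mem _ hx)) (c + 1),
        ← range_map_shift c r.length, List.cons_append]
    congr 2
    push_cast
    ring

theorem csGo_reset (suf : List String) (k : Int)
    (h : suf = [] ∨ ∃ t r, suf = t :: r ∧ t ≠ "win") :
    csGo k suf = csGo 0 suf := by
  rcases h with h | ⟨t, r, rfl, ht⟩
  · simp [h, csGo]
  · have : (t == "win") = false := by simpa using ht
    simp [csGo, this]

theorem dropWhile_shape (p : String → Bool) (l : List String) :
    l.dropWhile p = [] ∨ ∃ t r, l.dropWhile p = t :: r ∧ p t = false := by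
  rcases h : l.dropWhile p with _ | ⟨t, r⟩
  · exact Or.inl rfl
  · exact Or.inr ⟨t, r, rfl, by
      have := List.head?_dropWhile_not p l
      rw [h] at this; simpa using this⟩

theorem csGo_eq_alt : ∀ (series : List String), csGo 0 series = compute_win_streak_alt series
  | [] => by simp [csGo, compute_win_streak_alt]
  | s :: rest => by
    rw [compute_win_streak_alt]
    have hsplit : rest.takeWhile (· == s) ++ rest.dropWhile (· == s) = rest :=
      List.takeWhile_append_dropWhile
    have hmem : ∀ x ∈ rest.takeWhile (· == s), x = s := by
      intro x hx
      have := List.mem_takeWhile_imp hx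
      simpa using this
    have hshape := dropWhile_shape (· == s) rest
    have ih : csGo 0 (rest.dropWhile (· == s)) = compute_win_streak_alt (rest.dropWhile (· == s)) :=
      csGo_eq_alt (rest.dropWhile (· == s))
    by_cases hs : s = "win"
    · subst hs
      have hw : ∀ x ∈ "win" :: rest.takeWhile (· == "win"), x = "win" := by
        intro x hx
        rcases List.mem_cons.mp hx with rfl | hx
        · rfl
        · exact hmem x hx
      conv_lhs => rw [← hsplit, ← List.cons_append]
      rw [csGo_wins _ _ hw 0]
      have hreset : csGo (0 + (("win" :: rest.takeWhile (· == "win")).length : Int))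
          (rest.dropWhile (· == "win")) = csGo 0 (rest.dropWhile (· == "win")) := by
        apply csGo_reset
        rcases hshape with h | ⟨t, r, h, ht⟩
        · exact Or.inl h
        · exact Or.inr ⟨t, r, h, by simpa using ht⟩
      rw [hreset, ih]
      simp only [List.length_cons]
      rw [if_pos (show ("win" == "win") = true from rfl)]
      congr 1
      apply List.map_congr_left
      intro i _
      omega
    · have hnw : ∀ x ∈ s :: rest.takeWhile (· == s), x ≠ "win" := by
        intro x hx
        rcases List.mem_cons.mp hx with rfl | hx
        · exact hs
        · rw [hmem x hx]; exact hs
      conv_lhs => rw [← hsplit, ← List.cons_append]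
      rw [csGo_zeros _ _ hnw, ih]
      have hbeq : (s == "win") = false := by simpa using hs
      simp [hbeq]
termination_by series => series.length
decreasing_by
  all_goals simp only [List.length_cons]
  all_goals exact Nat.lt_succ_of_le (List.length_dropWhile_le _ _)

-- ===== VERDICT (by name: the statement is the Claim_ definition above) =====
theorem compute_win_streak_spec : Claim_equal_compute_win_streak := by
  intro series _
  unfold Spec_compute_win_streak compute_win_streak
  rw [csGo_foldl]
  simpa using csGo_eq_alt series
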